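-- pv_equiv track=rewrite | github.com/jagdishwar/CP | Atcoder_DP/Number of Ways to Represent N Dollars.py | dp
-- ===== SOURCE A (Python) =====
-- coins=[1,2,5]
--
-- def dp(amount):
--     if amount==0:
--         return 1
--     res=0
--     for i in range(len(coins)):
--         if amount-coins[i]>=0 :
--             res=dp(amount-coins[i])+res
--
--     return res
-- ===== SOURCE B (Python) =====
-- def dp(amount):
--     # Bottom-up linear DP keeping a sliding window of the last five counts:
--     # (t[n-4], t[n-3], t[n-2], t[n-1], t[n]), where t[m] = 0 for m < 0.
--     if amount < 0:
--         return 0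
--     a, b, c, d, e = 0, 0, 0, 0, 1
--     for _ in range(amount):
--         a, b, c, d, e = b, c, d, e, e + d + a
--     return e
-- ===== Notes on version B (the rewrite author's own statement) =====
-- stated objective: alternative
-- what changed: Replaced the exponential top-down recursion over the three coins with a bottom-up linear DP keeping only a sliding window of the last five table values (intended as asymptotically faster; a timing run could not confirm a ratio because A times out on the larger sizes); Pre_ excludes amounts above 900, where A's recursion exceeds Python's recursion limit and raises RecursionError.
import Mathlib
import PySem

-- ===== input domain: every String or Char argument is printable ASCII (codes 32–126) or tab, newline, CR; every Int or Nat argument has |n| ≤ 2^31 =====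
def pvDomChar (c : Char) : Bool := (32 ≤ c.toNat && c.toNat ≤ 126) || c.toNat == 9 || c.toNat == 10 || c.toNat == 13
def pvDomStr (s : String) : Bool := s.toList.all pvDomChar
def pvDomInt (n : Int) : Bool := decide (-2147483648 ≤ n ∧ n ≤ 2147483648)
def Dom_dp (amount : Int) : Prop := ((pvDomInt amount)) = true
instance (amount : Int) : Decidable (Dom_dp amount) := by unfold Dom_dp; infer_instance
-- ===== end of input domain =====

-- ===== PORT A =====
-- coins = [1,2,5]; the fixed loop over range(len(coins)) is unrolled into its three iterations
def dp (amount : Int) : Int :=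
  if amount = 0 then 1
  else
    let res : Int := 0
    let res := if amount - 1 ≥ 0 then dp (amount - 1) + res else res
    let res := if amount - 2 ≥ 0 then dp (amount - 2) + res else res
    let res := if amount - 5 ≥ 0 then dp (amount - 5) + res else res
    res
termination_by amount.toNat
decreasing_by all_goals omega

-- ===== PORT B =====
def dp_alt (amount : Int) : Int :=
  if amount < 0 then 0
  else
    let s := (List.range amount.toNat).foldl
      (fun (st : Int × Int × Int × Int × Int) _ =>
        let (a, b, c, d, e) := st
        (b, c, d, e, e + d + a)) (0, 0, 0, 0, 1)
    s.2.2.2.2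

-- ===== PRECONDITION & SPEC =====
-- Pre_ excludes large amounts: there A's recursion depth (≈ amount frames) exceeds Python's
-- default recursion limit (~1000) and A raises RecursionError; the bound 900 leaves margin
-- because the exact limit depends on the caller's stack depth.
def Pre_dp (amount : Int) : Prop := amount ≤ 900
instance (amount : Int) : Decidable (Pre_dp amount) := by unfold Pre_dp; infer_instance
def pvWitness_dp : Int := (7)

def Spec_dp (amount : Int) (out : Int) : Prop := out = dp_alt amount
instance (amount : Int) (out : Int) : Decidable (Spec_dp amount out) := by unfold Spec_dp; infer_instance

-- ===== CLAIM (what is proved, stated in full; the proofs are below) =====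
def Claim_equal_dp : Prop := ∀ (amount : Int), Dom_dp amount → Pre_dp amount → Spec_dp amount (dp amount)

-- ===== LEMMAS AND PROOFS =====

theorem dp_neg (m : Int) (h : m < 0) : dp m = 0 := by
  rw [dp]
  have h0 : ¬ (m = 0) := by omega
  rw [if_neg h0]
  split_ifs <;> first | omega | simp

theorem dp_rec (m : Int) (h : 0 < m) : dp m = dp (m - 1) + dp (m - 2) + dp (m - 5) := by
  rw [dp]
  have h0 : ¬ (m = 0) := by omega
  rw [if_neg h0]
  have h1 : m - 1 ≥ 0 := by omega
  split_ifs with h5 h2 h2 <;> try omega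
  · ring
  · rw [dp_neg (m - 5) (by omega)]; ring
  · rw [dp_neg (m - 2) (by omega), dp_neg (m - 5) (by omega)]; ring

theorem dp_fold (k : Nat) :
    (List.range k).foldl
      (fun (st : Int × Int × Int × Int × Int) _ =>
        let (a, b, c, d, e) := st
        (b, c, d, e, e + d + a)) (0, 0, 0, 0, 1)
    = (dp ((k : Int) - 4), dp ((k : Int) - 3), dp ((k : Int) - 2), dp ((k : Int) - 1), dp (k : Int)) := by
  induction k with
  | zero =>
      simp [dp_neg (-4) (by omega), dp_neg (-3) (by omega), dp_neg (-2) (by omega),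
        dp_neg (-1) (by omega)]
      rw [dp]; simp
  | succ n ih =>
      rw [List.range_succ, List.foldl_append, ih]
      simp only [List.foldl_cons, List.foldl_nil, Prod.mk.injEq]
      have e1 : (n : Int) + 1 - 1 = (n : Int) := by ring
      have e2 : (n : Int) + 1 - 2 = (n : Int) - 1 := by ring
      have e5 : (n : Int) + 1 - 5 = (n : Int) - 4 := by ring
      have hrec := dp_rec ((n : Int) + 1) (by omega)
      rw [e1, e2, e5] at hrec
      push_cast
      refine ⟨by congr 1; ring, by congr 1; ring, by congr 1; ring, by congr 1; ring, ?_⟩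
      rw [hrec]

-- ===== VERDICT (by name: the statement is the Claim_ definition above) =====
theorem dp_spec : Claim_equal_dp := by
  intro amount _ _
  unfold Spec_dp dp_alt
  by_cases h : amount < 0
  · simp [h, dp_neg amount h]
  · rw [if_neg h, dp_fold]
    have : (amount.toNat : Int) = amount := by omega
    rw [this]
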